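-- pv_equiv track=rewrite | github.com/yoonho0922/Algorithm | python/daliy-solve/2024-08/week02/좋은단어.py | check
-- ===== SOURCE A (Python) =====
-- def check(s):
--     stack = []
--     for c in s:
--         if stack and stack[-1] == c:
--             stack.pop()
--         else:
--             stack.append(c)
--     return not stack
-- ===== SOURCE B (Python) =====
-- def check(s):
--     t = list(s)
--     while True:
--         for i in range(len(t) - 1):
--             if t[i] == t[i + 1]:
--                 del t[i:i + 2]
--                 break
--         else:
--             return not t
-- ===== Notes on version B (the rewrite author's own statement) =====
-- stated objective: alternative
-- what changed: Replaces the single-pass stack cancellation with repeated full scans that delete the first adjacent equal pair until none remains (correct by confluence of adjacent-pair deletion).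
import Mathlib
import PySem

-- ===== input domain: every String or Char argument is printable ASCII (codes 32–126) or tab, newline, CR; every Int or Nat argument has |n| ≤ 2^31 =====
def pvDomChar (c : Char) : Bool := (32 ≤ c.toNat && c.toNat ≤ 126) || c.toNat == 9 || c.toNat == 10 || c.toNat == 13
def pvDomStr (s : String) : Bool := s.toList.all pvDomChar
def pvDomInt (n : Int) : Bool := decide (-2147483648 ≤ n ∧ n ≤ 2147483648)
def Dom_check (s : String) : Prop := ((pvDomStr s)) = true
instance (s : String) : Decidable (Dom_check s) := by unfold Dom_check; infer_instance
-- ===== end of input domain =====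

-- B changes the strategy, not the result: instead of A's one-pass stack, B repeatedly scans for the
-- first adjacent equal pair and deletes it until none remains ("alternative"; not claimed faster).

-- ===== PORT A =====
-- stack kept with the top at the END, exactly as Python appends/pops at the end
def check (s : String) : Bool :=
  let stack := s.toList.foldl
    (fun stack c =>
      if stack ≠ [] ∧ stack.getLast? = some c then stack.dropLast else stack ++ [c]) []
  stack.isEmpty

-- ===== PORT B =====
-- one inner for-scan of Source B: find the first adjacent equal pair and delete it (none ↔ the for-loop falls through)
def checkDelFirst : List Char → Option (List Char)
  | a :: b :: rest => if a = b then some rest else (checkDelFirst (b :: rest)).map (a :: ·)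
  | _ => none

theorem checkDelFirst_length : ∀ {t t' : List Char}, checkDelFirst t = some t' → t'.length < t.length := by
  intro t
  induction t with
  | nil => intro t' h; simp [checkDelFirst] at h
  | cons a rest ih =>
    intro t' h
    match rest, h with
    | b :: r, h =>
      by_cases hab : a = b
      · simp [checkDelFirst, hab] at h
        subst h; simp
      · simp [checkDelFirst, hab] at h
        obtain ⟨u, hu, rfl⟩ := h
        have := ih hu
        simp at this ⊢; omega

-- the outer while-loop of Source B
def checkReduce (t : List Char) : List Char :=
  match h : checkDelFirst t with
  | some t' => checkReduce t'
  | none => t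
termination_by t.length
decreasing_by exact checkDelFirst_length h

def check_alt (s : String) : Bool := (checkReduce s.toList).isEmpty

-- ===== PRECONDITION & SPEC =====
def Spec_check (s : String) (out : Bool) : Prop := out = check_alt s
instance (s : String) (out : Bool) : Decidable (Spec_check s out) := by unfold Spec_check; infer_instance

-- ===== CLAIM (what is proved, stated in full; the proofs are below) =====
def Claim_equal_check : Prop := ∀ (s : String), Dom_check s → Spec_check s (check s)

-- ===== LEMMAS AND PROOFS =====

-- A's stack, represented reversed (top at the head)
def checkStepR (r : List Char) (c : Char) : List Char :=
  match r with
  | x :: xs => if x = c then xs else c :: x :: xs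
  | [] => [c]

theorem check_foldl_rev (l : List Char) : ∀ stack : List Char,
    l.foldl (fun stack c =>
      if stack ≠ [] ∧ stack.getLast? = some c then stack.dropLast else stack ++ [c]) stack
    = (l.foldl checkStepR stack.reverse).reverse := by
  induction l with
  | nil => intro stack; simp
  | cons c l ih =>
    intro stack
    rw [List.foldl_cons, List.foldl_cons, ih]
    congr 1
    rcases h : stack.reverse with _ | ⟨x, xs⟩
    · have : stack = [] := by simpa using congrArg List.reverse h
      subst this; simp [checkStepR]
    · have hs : stack = (x :: xs).reverse := by
        have := congrArg List.reverse h; simpa using this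
      subst hs
      by_cases hx : x = c
      · simp [checkStepR, hx]
      · simp [checkStepR, hx, List.getLast?_reverse]

-- the reversed stack never holds two equal adjacent chars
theorem checkStepR_chain {r : List Char} (h : List.IsChain (· ≠ ·) r) (c : Char) :
    List.IsChain (· ≠ ·) (checkStepR r c) := by
  rcases r with _ | ⟨x, xs⟩
  · simp [checkStepR]
  · by_cases hx : x = c
    · simpa [checkStepR, hx] using List.IsChain.of_cons h
    · simp only [checkStepR, if_neg hx]
      exact List.isChain_cons_cons.mpr ⟨fun hc => hx hc.symm, h⟩

-- pop-after-push / push-after-pop cancel on an adjacent-duplicate-free stack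
theorem checkStepR_cancel {r : List Char} (h : List.IsChain (· ≠ ·) r) (c : Char) :
    checkStepR (checkStepR r c) c = r := by
  rcases r with _ | ⟨x, xs⟩
  · simp [checkStepR]
  · by_cases hx : x = c
    · subst hx
      rcases xs with _ | ⟨y, ys⟩
      · simp [checkStepR]
      · have hyx : x ≠ y := (List.isChain_cons_cons.mp h).1
        have h2 : y ≠ x := fun hq => hyx hq.symm
        simp [checkStepR, h2]
    · simp [checkStepR, hx]

-- deleting the first adjacent pair does not change A's fold
theorem check_delFirst_fold : ∀ {t t' : List Char}, checkDelFirst t = some t' →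
    ∀ r : List Char, List.IsChain (· ≠ ·) r →
    t.foldl checkStepR r = t'.foldl checkStepR r := by
  intro t
  induction t with
  | nil => intro t' h; simp [checkDelFirst] at h
  | cons a rest ih =>
    intro t' h r hr
    match rest, h with
    | b :: rs, h =>
      by_cases hab : a = b
      · simp [checkDelFirst, hab] at h
        subst h; subst hab
        rw [List.foldl_cons, List.foldl_cons, checkStepR_cancel hr]
      · simp [checkDelFirst, hab] at h
        obtain ⟨u, hu, rfl⟩ := h
        rw [List.foldl_cons, List.foldl_cons]
        exact ih hu _ (checkStepR_chain hr a)

theorem check_reduce_fold (t : List Char) : ∀ r : List Char, List.IsChain (· ≠ ·) r →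
    t.foldl checkStepR r = (checkReduce t).foldl checkStepR r := by
  induction t using checkReduce.induct with
  | case1 t t' h ih =>
    intro r hr
    rw [checkReduce, h, check_delFirst_fold h r hr]
    exact ih r hr
  | case2 t h =>
    intro r _
    rw [checkReduce, h]

theorem check_delFirst_none_chain : ∀ {t : List Char}, checkDelFirst t = none →
    List.IsChain (· ≠ ·) t := by
  intro t
  induction t with
  | nil => intro _; exact List.IsChain.nil
  | cons a rest ih =>
    intro h
    match rest, h with
    | [], _ => exact List.IsChain.singleton a
    | b :: rs, h =>
      by_cases hab : a = b
      · simp [checkDelFirst, hab] at h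
      · simp [checkDelFirst, hab] at h
        exact List.isChain_cons_cons.mpr ⟨hab, ih h⟩

theorem check_reduce_chain (t : List Char) : List.IsChain (· ≠ ·) (checkReduce t) := by
  induction t using checkReduce.induct with
  | case1 t t' h ih => rwa [checkReduce, h]
  | case2 t h =>
    rw [checkReduce, h]
    exact check_delFirst_none_chain h

-- folding an adjacent-duplicate-free list onto a compatible stack just stacks it up
theorem check_fold_pairfree (t : List Char) : ∀ r : List Char,
    List.IsChain (· ≠ ·) t →
    (∀ x ∈ r.head?, ∀ a ∈ t.head?, x ≠ a) →
    t.foldl checkStepR r = t.reverse ++ r := by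
  induction t with
  | nil => intro r _ _; simp
  | cons a rest ih =>
    intro r hc hh
    have hstep : checkStepR r a = a :: r := by
      rcases r with _ | ⟨x, xs⟩
      · simp [checkStepR]
      · have hx : x ≠ a := hh x rfl a rfl
        simp [checkStepR, hx]
    rw [List.foldl_cons, hstep, ih (a :: r) (List.IsChain.of_cons hc)]
    · simp
    · intro x hx b hb
      simp at hx
      subst hx
      rcases rest with _ | ⟨c, cs⟩
      · simp at hb
      · simp at hb; subst hb
        exact (List.isChain_cons_cons.mp hc).1

-- ===== VERDICT (by name: the statement is the Claim_ definition above) =====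
theorem check_spec : Claim_equal_check := by
  intro s _
  unfold Spec_check check check_alt
  rw [check_foldl_rev]
  rw [show ([] : List Char).reverse = [] from rfl]
  rw [check_reduce_fold s.toList [] List.IsChain.nil]
  rw [check_fold_pairfree _ [] (check_reduce_chain s.toList) (by simp)]
  simp
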